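-- pv_equiv track=rewrite | github.com/mohnihal/python_practice | problem_unique_list_count.py | Solution
-- ===== SOURCE A (Python) =====
-- def Solution(nums,k):
--     unique_set=set()
--     for n in nums:
--         diff=n-k
--         tup=(n,diff)
--         # print (tup)
--         if diff in nums and diff>0 and tup not in unique_set:
--             unique_set.add((n,diff))
--             # print (unique_set)
--     return len(unique_set)
-- ===== SOURCE B (Python) =====
-- def Solution(nums, k):
--     vals = sorted(set(nums))                     # strictly increasing distinct values
--     shifted = [v + k for v in vals if v > 0]     # also strictly increasing
--     # count common elements of the two strictly increasing lists by a linear merge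
--     count = 0
--     i = j = 0
--     while i < len(shifted) and j < len(vals):
--         if shifted[i] < vals[j]:
--             i += 1
--         elif shifted[i] > vals[j]:
--             j += 1
--         else:
--             count += 1
--             i += 1
--             j += 1
--     return count
-- ===== Notes on version B (the rewrite author's own statement) =====
-- stated objective: faster
-- what changed: Replaces A's per-element membership scan with pair dedup by sorting the distinct values once, forming the strictly increasing shifted list [v+k for positive v], and counting common elements of the two sorted lists with a single two-pointer merge (no membership tests at all).
import Mathlib
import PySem

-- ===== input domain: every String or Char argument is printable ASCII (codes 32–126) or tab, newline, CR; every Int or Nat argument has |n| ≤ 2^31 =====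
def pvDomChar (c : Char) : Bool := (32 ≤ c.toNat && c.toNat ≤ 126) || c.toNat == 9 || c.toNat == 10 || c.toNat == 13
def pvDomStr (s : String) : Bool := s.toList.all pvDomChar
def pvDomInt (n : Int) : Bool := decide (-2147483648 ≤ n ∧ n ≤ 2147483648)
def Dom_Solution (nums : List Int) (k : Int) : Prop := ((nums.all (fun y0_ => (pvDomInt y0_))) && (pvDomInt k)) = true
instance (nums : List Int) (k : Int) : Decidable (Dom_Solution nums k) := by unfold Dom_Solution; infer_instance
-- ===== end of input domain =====

-- B sorts the distinct values once and counts matches of the two strictly increasing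
-- lists (shifted positives vs values) by a two-pointer merge, instead of A's
-- per-element membership scan with pair dedup (objective: faster).

-- ===== PORT A =====
def Solution (nums : List Int) (k : Int) : Int :=
  let uniqueSet : PySem.Set (Int × Int) :=
    nums.foldl (fun (s : PySem.Set (Int × Int)) n =>
      let diff := n - k
      let tup := (n, diff)
      if diff ∈ nums ∧ diff > 0 ∧ tup ∉ s then PySem.Set.add s tup else s)
      PySem.Set.empty
  (uniqueSet.length : Int)

-- ===== PORT B =====
-- B's while loop over indices i into `shifted` and j into `vals`, as the obvious
-- structural recursion over the two suffixes.
def mergeCommon : List Int → List Int → Int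
  | [], _ => 0
  | _ :: _, [] => 0
  | x :: xs, y :: ys =>
    if x < y then mergeCommon xs (y :: ys)
    else if x > y then mergeCommon (x :: xs) ys
    else 1 + mergeCommon xs ys

def Solution_alt (nums : List Int) (k : Int) : Int :=
  let vals := PySem.List.sorted (PySem.Set.ofList nums) (fun x => x) false
  let shifted := (vals.filter (fun v => decide (v > 0))).map (fun v => v + k)
  mergeCommon shifted vals

-- ===== PRECONDITION & SPEC =====
def Spec_Solution (nums : List Int) (k : Int) (out : Int) : Prop := out = Solution_alt nums k
instance (nums : List Int) (k : Int) (out : Int) : Decidable (Spec_Solution nums k out) := by unfold Spec_Solution; infer_instance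

-- ===== CLAIM (what is proved, stated in full; the proofs are below) =====
def Claim_equal_Solution : Prop := ∀ (nums : List Int) (k : Int), Dom_Solution nums k → Spec_Solution nums k (Solution nums k)

-- ===== LEMMAS AND PROOFS =====

-- A's loop, pushed through: it inserts the pairs (n, n-k) of the qualifying n, in order.
theorem foldA_eq (nums : List Int) (k : Int) :
    ∀ (l : List Int) (s : PySem.Set (Int × Int)),
      l.foldl (fun (s : PySem.Set (Int × Int)) n =>
          let diff := n - k
          let tup := (n, diff)
          if diff ∈ nums ∧ diff > 0 ∧ tup ∉ s then PySem.Set.add s tup else s) s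
      = PySem.Set.update s
          ((l.filter (fun n => decide ((n - k) ∈ nums ∧ n - k > 0))).map (fun n => (n, n - k))) := by
  intro l
  induction l with
  | nil => intro s; simp [PySem.Set.update]
  | cons x xs ih =>
    intro s
    rw [List.foldl_cons]
    have hstep : (let diff := x - k
        let tup := (x, diff)
        if diff ∈ nums ∧ diff > 0 ∧ tup ∉ s then PySem.Set.add s tup else s)
        = if (x - k) ∈ nums ∧ x - k > 0 then PySem.Set.add s (x, x - k) else s := by
      show (if (x - k) ∈ nums ∧ x - k > 0 ∧ (x, x - k) ∉ s
          then PySem.Set.add s (x, x - k) else s)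
        = if (x - k) ∈ nums ∧ x - k > 0 then PySem.Set.add s (x, x - k) else s
      by_cases hp : (x - k) ∈ nums ∧ x - k > 0
      · by_cases hm : (x, x - k) ∈ s
        · rw [if_neg (by tauto), if_pos hp, PySem.Set.add_of_mem hm]
        · rw [if_pos ⟨hp.1, hp.2, hm⟩, if_pos hp]
      · rw [if_neg (by tauto), if_neg hp]
    rw [hstep]
    by_cases hp : (x - k) ∈ nums ∧ x - k > 0
    · rw [if_pos hp, ih, List.filter_cons_of_pos (by simpa using hp), List.map_cons,
        PySem.Set.update_cons]
    · rw [if_neg hp, ih, List.filter_cons_of_neg (by simpa using hp)]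

theorem ofList_toFinset {α : Type} [BEq α] [LawfulBEq α] [DecidableEq α] (l : List α) :
    (PySem.Set.ofList l).toFinset = l.toFinset := by
  ext x; simp [List.mem_toFinset, PySem.Set.mem_ofList]

theorem nodup_len_card {α : Type} [DecidableEq α] (l : List α) (h : l.Nodup) :
    l.length = l.toFinset.card := (List.toFinset_card_of_nodup h).symm

theorem ofList_length {α : Type} [BEq α] [LawfulBEq α] [DecidableEq α] (l : List α) :
    (PySem.Set.ofList l).length = l.toFinset.card := by
  rw [nodup_len_card _ (PySem.Set.nodup_ofList l), ofList_toFinset]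

-- merge count of two strictly increasing lists = size of the intersection of their value sets
theorem mergeCommon_card :
    ∀ (xs ys : List Int), xs.Pairwise (· < ·) → ys.Pairwise (· < ·) →
      mergeCommon xs ys = ((xs.toFinset ∩ ys.toFinset).card : Int) := by
  intro xs
  induction xs with
  | nil => intro ys _ _; simp [mergeCommon]
  | cons x xs ihx =>
    intro ys hx hy
    induction ys with
    | nil => simp [mergeCommon]
    | cons y ys ihy =>
      by_cases hlt : x < y
      · have hxnot : x ∉ (y :: ys).toFinset := by
          simp only [List.mem_toFinset, List.mem_cons]
          rintro (rfl | hmem)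
          · omega
          · have := (List.pairwise_cons.1 hy).1 x hmem; omega
        have : (x :: xs).toFinset ∩ (y :: ys).toFinset = xs.toFinset ∩ (y :: ys).toFinset := by
          ext z
          simp only [Finset.mem_inter, List.toFinset_cons, Finset.mem_insert]
          constructor
          · rintro ⟨(rfl | hz), hz2⟩
            · exact absurd (by simpa [List.toFinset_cons] using hz2) (by simpa [List.toFinset_cons] using hxnot)
            · exact ⟨hz, hz2⟩
          · rintro ⟨hz, hz2⟩; exact ⟨Or.inr hz, hz2⟩
        rw [show mergeCommon (x :: xs) (y :: ys) = mergeCommon xs (y :: ys) by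
          simp [mergeCommon, hlt], ihx (y :: ys) (List.pairwise_cons.1 hx).2 hy, this]
      · by_cases hgt : x > y
        · have hynot : y ∉ (x :: xs).toFinset := by
            simp only [List.mem_toFinset, List.mem_cons]
            rintro (rfl | hmem)
            · omega
            · have := (List.pairwise_cons.1 hx).1 y hmem; omega
          have : (x :: xs).toFinset ∩ (y :: ys).toFinset = (x :: xs).toFinset ∩ ys.toFinset := by
            ext z
            simp only [Finset.mem_inter, List.toFinset_cons, Finset.mem_insert]
            constructor
            · rintro ⟨hz, (rfl | hz2)⟩
              · exact absurd (by simpa [List.toFinset_cons] using hz) (by simpa [List.toFinset_cons] using hynot)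
              · exact ⟨hz, hz2⟩
            · rintro ⟨hz, hz2⟩; exact ⟨hz, Or.inr hz2⟩
          rw [show mergeCommon (x :: xs) (y :: ys) = mergeCommon (x :: xs) ys by
            simp [mergeCommon, hlt, hgt], ihy (List.pairwise_cons.1 hy).2, this]
        · have heq : x = y := by omega
          subst heq
          have hxxs : x ∉ xs := fun hmem => by
            have := (List.pairwise_cons.1 hx).1 x hmem; omega
          have hxys : x ∉ ys := fun hmem => by
            have := (List.pairwise_cons.1 hy).1 x hmem; omega
          have hset : (x :: xs).toFinset ∩ (x :: ys).toFinset
              = insert x (xs.toFinset ∩ ys.toFinset) := by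
            ext z
            simp only [Finset.mem_inter, List.toFinset_cons, Finset.mem_insert,
              List.mem_toFinset]
            constructor
            · rintro ⟨(rfl | hz), (h2 | hz2)⟩
              · exact Or.inl rfl
              · exact Or.inl rfl
              · exact Or.inl h2
              · exact Or.inr ⟨hz, hz2⟩
            · rintro (rfl | ⟨hz, hz2⟩)
              · exact ⟨Or.inl rfl, Or.inl rfl⟩
              · exact ⟨Or.inr hz, Or.inr hz2⟩
          have hxnotin : x ∉ xs.toFinset ∩ ys.toFinset := by
            simp [List.mem_toFinset, hxxs, hxys]
          rw [show mergeCommon (x :: xs) (x :: ys) = 1 + mergeCommon xs ys by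
            simp [mergeCommon],
            ihx ys (List.pairwise_cons.1 hx).2 (List.pairwise_cons.1 hy).2,
            hset, Finset.card_insert_of_notMem hxnotin]
          push_cast
          ring

-- the key combinatorial fact: the counted value sets coincide under the shift m ↦ m + k
theorem finset_key (T : Finset Int) (k : Int) :
    ((T.filter (fun m => m > 0)).image (fun m => m + k) ∩ T)
    = T.filter (fun n => (n - k) ∈ T ∧ n - k > 0) := by
  ext x
  simp only [Finset.mem_inter, Finset.mem_image, Finset.mem_filter]
  constructor
  · rintro ⟨⟨m, ⟨hmT, hm0⟩, rfl⟩, hxT⟩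
    exact ⟨hxT, by simpa using hmT, by omega⟩
  · rintro ⟨hxT, hdT, hd0⟩
    exact ⟨⟨x - k, ⟨hdT, hd0⟩, by ring⟩, hxT⟩

-- ===== VERDICT (by name: the statement is the Claim_ definition above) =====
theorem Solution_spec : Claim_equal_Solution := by
  intro nums k _
  show Solution nums k = Solution_alt nums k
  -- A's side: the count of qualifying distinct values
  have hinj : Function.Injective (fun n : Int => (n, n - k)) := by
    intro a b h; exact congrArg Prod.fst h
  have hA : Solution nums k
      = ((nums.toFinset.filter (fun n => (n - k) ∈ nums.toFinset ∧ n - k > 0)).card : Int) := by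
    show ((nums.foldl (fun (s : PySem.Set (Int × Int)) n =>
      let diff := n - k
      let tup := (n, diff)
      if diff ∈ nums ∧ diff > 0 ∧ tup ∉ s then PySem.Set.add s tup else s)
      PySem.Set.empty).length : Int) = _
    rw [foldA_eq]
    show ((PySem.Set.ofList _).length : Int) = _
    rw [ofList_length]
    congr 1
    rw [show ((nums.filter (fun n => decide ((n - k) ∈ nums ∧ n - k > 0))).map
        (fun n => (n, n - k))).toFinset
        = ((nums.filter (fun n => decide ((n - k) ∈ nums ∧ n - k > 0))).toFinset).image
            (fun n => (n, n - k)) by ext z; simp,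
      Finset.card_image_of_injective _ hinj, List.toFinset_filter]
    congr 1
    ext x
    simp
  -- B's side
  set vals := PySem.List.sorted (PySem.Set.ofList nums) (fun x : Int => x) false with hvals
  have hvsort : vals.Pairwise (· < ·) := PySem.List.sorted_ofList_pairwise_lt nums
  have hvfin : vals.toFinset = nums.toFinset := by
    ext x
    simp [hvals, List.mem_toFinset, PySem.List.mem_sorted, PySem.Set.mem_ofList]
  have hssort : ((vals.filter (fun v => decide (v > 0))).map (fun v => v + k)).Pairwise (· < ·) := by
    refine List.Pairwise.map _ (fun a b h => by omega) ?_
    exact (List.Pairwise.filter _ (hvsort.imp (fun {a b} h => show a + k < b + k by omega)))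
  have hB : Solution_alt nums k
      = (((vals.filter (fun v => decide (v > 0))).map (fun v => v + k)).toFinset
          ∩ vals.toFinset).card := by
    show mergeCommon ((vals.filter (fun v => decide (v > 0))).map (fun v => v + k)) vals = _
    rw [mergeCommon_card _ _ hssort hvsort]
  rw [hA, hB]
  congr 1
  have hmapfin : ((vals.filter (fun v => decide (v > 0))).map (fun v => v + k)).toFinset
      = (vals.toFinset.filter (fun m => m > 0)).image (fun m => m + k) := by
    ext z
    simp only [List.mem_toFinset, List.mem_map, List.mem_filter, Finset.mem_image,
      Finset.mem_filter, List.mem_toFinset]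
    constructor
    · rintro ⟨m, ⟨hm, hm0⟩, rfl⟩; exact ⟨m, ⟨hm, by simpa using hm0⟩, rfl⟩
    · rintro ⟨m, ⟨hm, hm0⟩, rfl⟩; exact ⟨m, ⟨hm, by simpa using hm0⟩, rfl⟩
  rw [hmapfin, hvfin, finset_key nums.toFinset k]
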